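-- pv_equiv track=rewrite | github.com/aborshy/code_advent_2021 | Advent of Code 2015/day_01/solution.py | solution
-- ===== SOURCE A (Python) =====
-- def solution(file_lines: list) -> int:
--     """
--     Returns int of the floor Santa is on, or returns the index of which character sent Santa in the basement
--
--     :param: file: String of one line of any amount of ( and ) characters
--     :return: Int of final Santa floor, or the move that sent Santa into the basement
--     """
--
--     parens = file_lines[0]
--     floor = 0
--
--     for index, paren in enumerate(parens, 1):
--         if paren == "(":
--             floor += 1
--         elif paren == ")":
--             floor -= 1
--         if floor < 0:
--             return index
--     return floor
-- ===== SOURCE B (Python) =====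
-- def solution(file_lines: list) -> int:
--     # Jump between ')' positions: the k-th ')' enters the basement iff fewer
--     # than k '(' occur before it; if none does, the final floor is the closed
--     # form count('(') - count(')').
--     chars = list(file_lines[0])
--     closings = [i for i, c in enumerate(chars) if c == ")"]
--     opens = 0
--     prev = 0
--     for k, pos in enumerate(closings, 1):
--         opens += chars[prev:pos].count("(")
--         if opens < k:
--             return pos + 1
--         prev = pos + 1
--     return chars.count("(") - len(closings)
-- ===== Notes on version B (the rewrite author's own statement) =====
-- stated objective: alternative
-- what changed: B does not track a running floor per character: it extracts the list of ')' positions once, walks only those positions accumulating '(' counts of the segments between them (the k-th ')' is the basement entry iff fewer than k '(' precede it), and returns the closed form count('(')-count(')') when the basement is never reached.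
import Mathlib
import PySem

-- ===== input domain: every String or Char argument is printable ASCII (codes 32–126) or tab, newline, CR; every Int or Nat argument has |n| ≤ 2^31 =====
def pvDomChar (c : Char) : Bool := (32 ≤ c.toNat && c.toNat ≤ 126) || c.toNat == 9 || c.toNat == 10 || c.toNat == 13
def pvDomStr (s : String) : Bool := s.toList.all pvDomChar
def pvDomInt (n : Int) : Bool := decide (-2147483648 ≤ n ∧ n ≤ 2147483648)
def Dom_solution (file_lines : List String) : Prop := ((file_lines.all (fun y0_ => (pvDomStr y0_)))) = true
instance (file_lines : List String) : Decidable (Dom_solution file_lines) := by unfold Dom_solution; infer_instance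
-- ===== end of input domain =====

-- B replaces A's per-character floor scan by a walk over the ')' positions with segment '(' counts and a closed-form final floor; same cost, different algorithm.

-- ===== PORT A =====
-- the 'for index, paren in enumerate(parens, 1)' loop: state = (index, floor)
def solutionLoopA : List Char → Int → Int → Int
  | [], _, floor => floor
  | c :: cs, idx, floor =>
    let f := if c = '(' then floor + 1 else if c = ')' then floor - 1 else floor
    if f < 0 then idx else solutionLoopA cs (idx + 1) f

def solution (file_lines : List String) : Int :=
  -- file_lines[0]: raises IndexError on []; excluded by Pre_solution, default "" is never used inside Pre_
  let parens := (PySem.List.pyGet? file_lines 0).getD ""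
  solutionLoopA parens.toList 1 0

-- ===== PORT B =====
-- the 'for k, pos in enumerate(closings, 1)' loop; early 'return' becomes some
def loopB (chars : List Char) : List Int → Int → Int → Int → Option Int
  | [], _, _, _ => none
  | pos :: ps, opens, k, prev =>
    let opens' := opens + ((PySem.List.slice chars (some prev) (some pos)).count '(' : Int)
    if opens' < k then some (pos + 1) else loopB chars ps opens' (k + 1) (pos + 1)

def solution_alt (file_lines : List String) : Int :=
  -- file_lines[0]: raises IndexError on []; excluded by Pre_solution
  let chars := ((PySem.List.pyGet? file_lines 0).getD "").toList
  let closings := (PySem.List.enumerate chars 0).filterMap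
      (fun p => if p.2 = ')' then some p.1 else none)
  match loopB chars closings 0 1 0 with
  | some r => r
  | none => (chars.count '(' : Int) - (closings.length : Int)

-- ===== PRECONDITION & SPEC =====
-- Pre_ excludes the empty list, on which both A and B raise IndexError at file_lines[0].
def Pre_solution (file_lines : List String) : Prop := file_lines ≠ []
instance (file_lines : List String) : Decidable (Pre_solution file_lines) := by unfold Pre_solution; infer_instance
def pvWitness_solution : List String := ["(())("]

def Spec_solution (file_lines : List String) (out : Int) : Prop := out = solution_alt file_lines
instance (file_lines : List String) (out : Int) : Decidable (Spec_solution file_lines out) := by unfold Spec_solution; infer_instance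

-- ===== CLAIM (what is proved, stated in full; the proofs are below) =====
def Claim_equal_solution : Prop := ∀ (file_lines : List String), Dom_solution file_lines → Pre_solution file_lines → Spec_solution file_lines (solution file_lines)

-- ===== LEMMAS AND PROOFS =====
-- the ')' positions of cs, with absolute offset i (proof-side mirror of B's comprehension)
def closFrom : List Char → Int → List Int
  | [], _ => []
  | c :: cs, i => if c = ')' then i :: closFrom cs (i + 1) else closFrom cs (i + 1)

theorem enum_filter_eq_closFrom (cs : List Char) : ∀ (i : Int),
    (PySem.List.enumerate cs i).filterMap (fun p => if p.2 = ')' then some p.1 else none)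
      = closFrom cs i := by
  induction cs with
  | nil => intro i; simp [PySem.List.enumerate_nil, closFrom]
  | cons c cs ih =>
    intro i
    simp only [PySem.List.enumerate_cons, List.filterMap_cons, closFrom]
    by_cases h : c = ')' <;> simp [h, ih]

theorem length_closFrom (cs : List Char) : ∀ (i : Int),
    (closFrom cs i).length = cs.count ')' := by
  induction cs with
  | nil => intro i; simp [closFrom]
  | cons c cs ih =>
    intro i
    by_cases h : c = ')' <;> simp [closFrom, h, ih]

theorem closFrom_close (cs : List Char) (i : Int) :
    closFrom (')' :: cs) i = i :: closFrom cs (i + 1) := by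
  simp [closFrom]

theorem closFrom_other {c : Char} (hc : c ≠ ')') (cs : List Char) (i : Int) :
    closFrom (c :: cs) i = closFrom cs (i + 1) := by
  simp [closFrom, hc]

-- one step of A's loop at a ')'
theorem stepA_close (cs : List Char) (idx floor : Int) :
    solutionLoopA (')' :: cs) idx floor =
      if floor - 1 < 0 then idx else solutionLoopA cs (idx + 1) (floor - 1) := by
  simp [solutionLoopA]

-- one step of A's loop at a non-')' character with a nonnegative floor: no early return
theorem stepA_other {c : Char} (hc : c ≠ ')') (cs : List Char) (idx floor : Int)
    (hfl : 0 ≤ floor) :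
    solutionLoopA (c :: cs) idx floor =
      solutionLoopA cs (idx + 1) (floor + if c = '(' then 1 else 0) := by
  by_cases h : c = '('
  · subst h
    have h1 : ¬ (floor + 1 < 0) := by omega
    simp [solutionLoopA, h1]
  · have h1 : ¬ (floor < 0) := by omega
    simp [solutionLoopA, h, hc, h1]

-- one step of B's loop
theorem loopB_cons (chars : List Char) (pos : Int) (ps : List Int) (opens k prev : Int) :
    loopB chars (pos :: ps) opens k prev =
      if opens + ((PySem.List.slice chars (some prev) (some pos)).count '(' : Int) < k
      then some (pos + 1)
      else loopB chars ps (opens + ((PySem.List.slice chars (some prev) (some pos)).count '(' : Int)) (k + 1) (pos + 1) := rfl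

-- main invariant: scanning v after a consumed prefix p (ending at the last ')') and a
-- ')'-free segment s, A's fused floor loop equals B's closing-position walk
theorem mainB (v : List Char) : ∀ (p s : List Char),
    s.count ')' = 0 →
    0 ≤ (p.count '(' : Int) + (s.count '(' : Int) - (p.count ')' : Int) →
    solutionLoopA v ((p.length : Int) + (s.length : Int) + 1)
        ((p.count '(' : Int) + (s.count '(' : Int) - (p.count ')' : Int)) =
      (match loopB (p ++ s ++ v) (closFrom v ((p.length : Int) + (s.length : Int)))
             (p.count '(' : Int) ((p.count ')' : Int) + 1) (p.length : Int) with
       | some r => r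
       | none => (((p ++ s ++ v).count '(' : Nat) : Int) - (((p ++ s ++ v).count ')' : Nat) : Int)) := by
  induction v with
  | nil =>
    intro p s hs _
    simp only [solutionLoopA, closFrom, loopB, List.append_nil, List.count_append, hs]
    push_cast
    ring
  | cons c cs ih =>
    intro p s hs hfl
    by_cases hc : c = ')'
    · subst hc
      have hslice : PySem.List.slice (p ++ s ++ (')' :: cs)) (some (p.length : Int))
          (some ((p.length : Int) + (s.length : Int))) = s := by
        have := PySem.List.slice_natCast_add (p ++ s ++ (')' :: cs)) p.length s.length
        rw [this, List.append_assoc, List.drop_left, List.take_left]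
      rw [stepA_close, closFrom_close, loopB_cons, hslice]
      by_cases h : (p.count '(' : Int) + (s.count '(' : Int) - (p.count ')' : Int) - 1 < 0
      · rw [if_pos h, if_pos (by omega)]
      · rw [if_neg h, if_neg (by omega)]
        have hfl' : 0 ≤ (((p ++ s ++ [')']).count '(' : Nat) : Int)
            + ((([] : List Char).count '(' : Nat) : Int)
            - (((p ++ s ++ [')']).count ')' : Nat) : Int) := by
          simp [List.count_append, hs]
          omega
        have key := ih (p ++ s ++ [')']) [] (by simp) hfl'
        simp [List.count_append, hs] at key ⊢
        convert key using 2
        ring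
    · -- c is not ')': the floor cannot drop; B's loop state is untouched
      rw [stepA_other hc _ _ _ hfl, closFrom_other hc]
      have key := ih p (s ++ [c])
        (by simp [List.count_append, hs, hc])
        (by by_cases h : c = '(' <;> simp [List.count_append, h] <;> omega)
      simp only [List.count_append, List.length_append, List.append_assoc,
        List.singleton_append, List.count_singleton, List.length_singleton, hs, zero_add] at key ⊢
      push_cast at key ⊢
      by_cases h : c = '('
      · simp [h] at key ⊢
        convert key using 2
        ring
      · simp [h, hc] at key ⊢
        convert key using 2

-- ===== VERDICT (by name: the statement is the Claim_ definition above) =====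
theorem solution_spec : Claim_equal_solution := by
  intro file_lines _ _
  unfold Spec_solution solution solution_alt
  simp only [enum_filter_eq_closFrom, length_closFrom]
  have h := mainB ((PySem.List.pyGet? file_lines 0).getD "").toList [] [] (by simp) (by simp)
  simp only [List.nil_append, List.length_nil, List.count_nil, Nat.cast_zero, zero_add, sub_zero] at h
  exact h
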